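-- pv_equiv track=rewrite | github.com/reynaldocv/leetcode | 2000 - 2999/2443. [Medium] Sum of Number and Its Reverse.py | sumOfNumberAndReverse
-- ===== SOURCE A (Python) =====
-- def sumOfNumberAndReverse(num: int) -> bool:
--     n = len(str(num))
--
--     start = 0
--
--     if n >= 2:
--         start = 10**(n - 2)
--
--     for elem in range(start, num + 1):
--         tmp = elem + int(str(elem)[:: -1])
--
--         if tmp == num:
--             return True
--
--     return False
-- ===== SOURCE B (Python) =====
-- def _revpad(v, m):
--     # value of v's m-digit zero-padded decimal representation read in reverse
--     r = 0
--     for _ in range(m):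
--         r = r * 10 + v % 10
--         v //= 10
--     return r
--
--
-- def sumOfNumberAndReverse(num: int) -> bool:
--     if num < 0:
--         return False
--     if num == 0:
--         return True
--     k = 0
--     t = num
--     while t > 0:
--         k += 1
--         t //= 10
--     # x must have d digits with d in {k-1, k}; write x = H*10**q + L, L < 10**q,
--     # where q = d//2.  Then num = x + rev(x) forces, for each high half H,
--     # a unique candidate low half L, checked in O(1) digit operations.
--     for d in range(max(1, k - 1), k + 1):
--         q = d // 2
--         hd = d - q
--         lowH = 10 ** (hd - 1) if d >= 2 else 1
--         for H in range(lowH, 10 ** hd):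
--             R = num - H * 10 ** q - _revpad(H, hd)
--             L = R % 10 ** hd
--             if L < 10 ** q and _revpad(L, q) == R // 10 ** hd:
--                 return True
--     return False
-- ===== Notes on version B (the rewrite author's own statement) =====
-- stated objective: faster
-- what changed: A brute-forces every candidate x in [start, num] and reverses each via a string round-trip; B meets in the middle: for each possible digit-length d of x it enumerates only the high half H of x's digits and solves x + reverse(x) = num for the unique candidate low half L in O(1) digit operations, so only O(sqrt(num)) candidates are examined.
import Mathlib
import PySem

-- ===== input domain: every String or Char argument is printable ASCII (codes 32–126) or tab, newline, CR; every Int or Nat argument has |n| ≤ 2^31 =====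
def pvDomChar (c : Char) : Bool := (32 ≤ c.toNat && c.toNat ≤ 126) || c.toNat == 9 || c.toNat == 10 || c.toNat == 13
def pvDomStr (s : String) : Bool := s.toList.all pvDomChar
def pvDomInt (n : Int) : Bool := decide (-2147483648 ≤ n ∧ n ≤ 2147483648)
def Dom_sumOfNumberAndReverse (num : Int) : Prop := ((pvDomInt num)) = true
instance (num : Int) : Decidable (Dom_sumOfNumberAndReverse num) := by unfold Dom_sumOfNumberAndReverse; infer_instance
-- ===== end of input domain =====

-- B replaces A's O(num)-candidate brute force by a meet-in-the-middle search over the high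
-- half of x's digits (O(sqrt(num)) candidates), each checked in O(log num) digit operations.

-- ===== PORT A =====
-- Python's int(s) is ported BY HAND here, mirroring CPython's rule for `int` of a `str`
-- exactly as PySem.Int.ofStr? does (strip whitespace, optional sign, decimal digits with
-- single underscores allowed between digits); PySem's own parser helpers are `private`
-- declarations that proofs cannot cite, which is the only reason for the hand port.
def pvIsIntSpace (c : Char) : Bool :=
  c = ' ' || c = '\t' || c = '\n' || c = '\r' || c = '\x0b' || c = '\x0c'

def pvDigitsGo : List Char → Bool → Nat → Option Nat
  | [], afterDigit, acc => if afterDigit = true then some acc else none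
  | c :: rest, afterDigit, acc =>
      if c.isDigit = true then pvDigitsGo rest true (acc * 10 + (c.toNat - '0'.toNat))
      else
        if c = '_' ∧ afterDigit = true then
          match rest with
          | d :: _ => if d.isDigit = true then pvDigitsGo rest false acc else none
          | [] => none
        else none

def pvDigitsVal? : List Char → Option Nat
  | [] => none
  | cs => pvDigitsGo cs false 0

def pvParseChars? (l : List Char) : Option Int :=
  match ((l.dropWhile pvIsIntSpace).reverse.dropWhile pvIsIntSpace).reverse with
  | '-' :: ds => (pvDigitsVal? ds).map (fun n => -(n : Int))
  | '+' :: ds => (pvDigitsVal? ds).map (fun n => (n : Int))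
  | ds => (pvDigitsVal? ds).map (fun n => (n : Int))

def pvIntParse? (s : String) : Option Int := pvParseChars? s.toList

def sumOfNumberAndReverse (num : Int) : Bool :=
  -- n = len(str(num))
  let n : Int := PySem.Str.len (PySem.Int.toStr num)
  -- start = 10**(n-2) if n >= 2 else 0  (the exponent is nonnegative there, so .toNat is exact)
  let start : Int := if 2 ≤ n then (10 : Int) ^ (n - 2).toNat else 0
  -- for elem in range(start, num + 1): if elem + int(str(elem)[::-1]) == num: return True
  -- str(elem)[::-1] never raises (step ≠ 0) and int(...) of it never raises (digit string),
  -- so the two .getD defaults are unreachable.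
  (PySem.List.pyRange start (num + 1) 1).any (fun elem =>
    elem + ((pvIntParse? ((PySem.Str.slice? (PySem.Int.toStr elem) none none (-1)).getD "")).getD 0) == num)

-- ===== PORT B =====
-- helper _revpad(v, m): r = 0; for _ in range(m): r = r*10 + v % 10; v //= 10; return r
def pvRevpad (v : Int) (m : Int) : Int :=
  ((PySem.List.pyRange 0 m 1).foldl
    (fun (rv : Int × Int) _ => (rv.1 * 10 + PySem.Int.mod rv.2 10, PySem.Int.floordiv rv.2 10))
    (0, v)).1

-- k = 0; t = num; while t > 0: k += 1; t //= 10   (counting loop, written as recursion)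
def pvCountDigits (t : Int) : Int :=
  if h : 0 < t then pvCountDigits (PySem.Int.floordiv t 10) + 1 else 0
termination_by t.toNat
decreasing_by
  rw [PySem.Int.floordiv_eq_ediv_of_pos (by omega)]
  omega

def sumOfNumberAndReverse_alt (num : Int) : Bool :=
  if num < 0 then false
  else if num == 0 then true
  else
    let k := pvCountDigits num
    -- for d in range(max(1, k - 1), k + 1): for H in range(lowH, 10**hd): ...
    -- (all Python ** exponents here are nonnegative, so .toNat is exact)
    (PySem.List.pyRange (max 1 (k - 1)) (k + 1) 1).any (fun d =>
      let q := PySem.Int.floordiv d 2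
      let hd := d - q
      let lowH : Int := if 2 ≤ d then (10 : Int) ^ (hd - 1).toNat else 1
      (PySem.List.pyRange lowH ((10 : Int) ^ hd.toNat) 1).any (fun H =>
        let R := num - H * (10 : Int) ^ q.toNat - pvRevpad H hd
        let L := PySem.Int.mod R ((10 : Int) ^ hd.toNat)
        decide (L < (10 : Int) ^ q.toNat) &&
          (pvRevpad L q == PySem.Int.floordiv R ((10 : Int) ^ hd.toNat))))

-- ===== PRECONDITION & SPEC =====
def Spec_sumOfNumberAndReverse (num : Int) (out : Bool) : Prop := out = sumOfNumberAndReverse_alt num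
instance (num : Int) (out : Bool) : Decidable (Spec_sumOfNumberAndReverse num out) := by unfold Spec_sumOfNumberAndReverse; infer_instance

-- ===== CLAIM (what is proved, stated in full; the proofs are below) =====
def Claim_equal_sumOfNumberAndReverse : Prop := ∀ (num : Int), Dom_sumOfNumberAndReverse num → Spec_sumOfNumberAndReverse num (sumOfNumberAndReverse num)

-- ===== LEMMAS AND PROOFS =====

-- `rp m v`: the value of v's m-digit zero-padded decimal representation read in reverse.
def rp : Nat → Nat → Nat
  | 0, _ => 0
  | m + 1, v => v % 10 * 10 ^ m + rp m (v / 10)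

def dlen (n : Nat) : Nat := (Nat.digits 10 n).length

theorem rp_lt : ∀ m v, rp m v < 10 ^ m := by
  intro m; induction m with
  | zero => intro v; simp [rp]
  | succ m ih =>
    intro v
    have h1 : v % 10 < 10 := Nat.mod_lt _ (by norm_num)
    have h2 := ih (v / 10)
    have : (10:Nat) ^ (m+1) = 10 * 10 ^ m := by ring
    simp only [rp]
    nlinarith [h2, h1]

theorem rp_split : ∀ (q : Nat) (hd H L : Nat), L < 10 ^ q →
    rp (hd + q) (H * 10 ^ q + L) = rp q L * 10 ^ hd + rp hd H := by
  intro q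
  induction q with
  | zero =>
    intro hd H L hL
    interval_cases L
    simp [rp]
  | succ q ih =>
    intro hd H L hL
    have hrw : H * 10 ^ (q+1) + L = 10 * (H * 10 ^ q) + L := by ring
    have hx10 : (H * 10 ^ (q+1) + L) % 10 = L % 10 := by
      rw [hrw, Nat.mul_add_mod]
    have hxd : (H * 10 ^ (q+1) + L) / 10 = H * 10 ^ q + L / 10 := by
      rw [hrw, Nat.mul_add_div (by norm_num)]
    have hL' : L / 10 < 10 ^ q := by
      rw [pow_succ] at hL
      omega
    have : hd + (q + 1) = (hd + q) + 1 := by omega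
    rw [this]
    simp only [rp, hx10, hxd, ih hd H (L / 10) hL']
    ring


-- digit-length bounds
theorem dlen_le_of_lt_pow {x m : Nat} (h : x < 10 ^ m) : dlen x ≤ m := by
  by_contra hc
  push Not at hc
  rcases Nat.eq_zero_or_pos x with rfl | hx
  · simp [dlen] at hc
  · have h1 : (10:Nat) ^ dlen x ≤ 10 * x := Nat.base_pow_length_digits_le 10 x (by norm_num) (by omega)
    have h2 : (10:Nat) ^ (m + 1) ≤ 10 ^ dlen x := Nat.pow_le_pow_right (by norm_num) (by omega)
    have h3 : (10:Nat) ^ (m+1) = 10 * 10 ^ m := by ring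
    omega

theorem lt_pow_dlen (x : Nat) : x < 10 ^ dlen x :=
  Nat.lt_base_pow_length_digits (by norm_num)

theorem pow_dlen_pred_le {x : Nat} (hx : 0 < x) : 10 ^ (dlen x - 1) ≤ x := by
  have h1 : (10:Nat) ^ dlen x ≤ 10 * x := Nat.base_pow_length_digits_le 10 x (by norm_num) (by omega)
  have hd : 1 ≤ dlen x := by
    have : Nat.digits 10 x ≠ [] := Nat.digits_ne_nil_iff_ne_zero.mpr (by omega)
    have : 0 < (Nat.digits 10 x).length := List.length_pos_iff.mpr this
    simpa [dlen] using this
  have h2 : (10:Nat) ^ dlen x = 10 * 10 ^ (dlen x - 1) := by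
    conv_lhs => rw [show dlen x = (dlen x - 1) + 1 by omega]
    ring
  omega

theorem dlen_mono {x y : Nat} (h : x ≤ y) : dlen x ≤ dlen y :=
  Nat.le_length_digits_le 10 x y h

theorem dlen_eq_iff {x d : Nat} (hd : 0 < d) (h1 : 10 ^ (d-1) ≤ x) (h2 : x < 10 ^ d) :
    dlen x = d := by
  have hx : 0 < x := lt_of_lt_of_le (by positivity : 0 < (10:Nat) ^ (d-1)) h1
  have ha : dlen x ≤ d := dlen_le_of_lt_pow h2
  have hb : ¬ (dlen x ≤ d - 1) := by
    intro hc
    have : x < 10 ^ (d-1) := lt_of_lt_of_le (lt_pow_dlen x) (Nat.pow_le_pow_right (by norm_num) hc)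
    omega
  omega

-- digitChar facts
theorem digitChar_toNat {d : Nat} (h : d < 10) : (Nat.digitChar d).toNat = d + 48 := by
  interval_cases d <;> decide

theorem digitChar_isDigit {d : Nat} (h : d < 10) : (Nat.digitChar d).isDigit = true := by
  interval_cases d <;> decide

-- characterization of Nat.toDigits (the function behind str(n) for n ≥ 0)
theorem toDigitsCore_eq : ∀ (f n : Nat) (l : List Char), n < f →
    Nat.toDigitsCore 10 f n l =
      (if n = 0 then ['0'] else ((Nat.digits 10 n).map Nat.digitChar).reverse) ++ l := by
  intro f
  induction f with
  | zero => intro n l h; omega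
  | succ f ih =>
    intro n l h
    rcases Nat.eq_zero_or_pos n with rfl | hn
    · simp [Nat.toDigitsCore]; rfl
    · by_cases h10 : n < 10
      · have hnd : n / 10 = 0 := Nat.div_eq_of_lt h10
        simp [Nat.toDigitsCore, hnd, Nat.digits_def' (by norm_num : (1:Nat) < 10) hn,
          Nat.mod_eq_of_lt h10, Nat.ne_of_gt hn]
      · have hnd : n / 10 ≠ 0 := by
          intro hc; exact h10 (by omega)
        have hlt : n / 10 < f := by omega
        simp only [Nat.toDigitsCore, hnd, if_false]
        rw [ih (n / 10) _ hlt]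
        simp only [hnd, if_false]
        rw [Nat.digits_def' (by norm_num : (1:Nat) < 10) hn]
        simp [Nat.ne_of_gt hn]

theorem toDigits_eq (n : Nat) :
    Nat.toDigits 10 n = if n = 0 then ['0'] else ((Nat.digits 10 n).map Nat.digitChar).reverse := by
  have := toDigitsCore_eq (n + 1) n [] (by omega)
  simpa [Nat.toDigits] using this

theorem toChars_nonneg {e : Int} (he : 0 ≤ e) :
    PySem.Int.toChars e =
      if e.toNat = 0 then ['0'] else ((Nat.digits 10 e.toNat).map Nat.digitChar).reverse := by
  rw [show PySem.Int.toChars e = Nat.toDigits 10 e.toNat by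
        simp [PySem.Int.toChars, not_lt.mpr he]
      ]
  exact toDigits_eq e.toNat


-- parser facts (about the hand-ported int())
theorem isSpace_false_of_digit {c : Char} (h : c.isDigit = true) : pvIsIntSpace c = false := by
  simp only [pvIsIntSpace, Bool.or_eq_false_iff, decide_eq_false_iff_not]
  refine ⟨⟨⟨⟨⟨?_, ?_⟩, ?_⟩, ?_⟩, ?_⟩, ?_⟩ <;> (rintro rfl; exact absurd h (by decide))

theorem dropWhile_eq_self_of_not {l : List Char} (h : ∀ c ∈ l, pvIsIntSpace c = false) :
    l.dropWhile pvIsIntSpace = l := by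
  cases l with
  | nil => rfl
  | cons c cs => simp [h c (by simp)]

theorem pvDigitsGo_eq : ∀ (l : List Char) (b : Bool) (a : Nat),
    (∀ c ∈ l, c.isDigit = true) → (l = [] → b = true) →
    pvDigitsGo l b a = some (l.foldl (fun x c => x * 10 + (c.toNat - 48)) a) := by
  intro l
  induction l with
  | nil => intro b a _ hb; simp [pvDigitsGo, hb rfl]
  | cons c cs ih =>
    intro b a hdig _
    have hc : c.isDigit = true := hdig c (by simp)
    simp only [pvDigitsGo, hc, if_true, List.foldl_cons]
    exact ih true _ (fun x hx => hdig x (by simp [hx])) (by simp)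

theorem pvParseChars?_digits {l : List Char} (hne : l ≠ [])
    (hdig : ∀ c ∈ l, c.isDigit = true) :
    pvParseChars? l = some ((l.foldl (fun x c => x * 10 + (c.toNat - 48)) 0 : Nat) : Int) := by
  have hns : ∀ c ∈ l, pvIsIntSpace c = false := fun c hc => isSpace_false_of_digit (hdig c hc)
  have hstrip : ((l.dropWhile pvIsIntSpace).reverse.dropWhile pvIsIntSpace).reverse = l := by
    rw [dropWhile_eq_self_of_not hns, dropWhile_eq_self_of_not (by simpa using hns), List.reverse_reverse]
  unfold pvParseChars?
  rw [hstrip]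
  rcases l with _ | ⟨c, ds⟩
  · exact absurd rfl hne
  · have hc : c.isDigit = true := hdig c (by simp)
    have hgo : pvDigitsVal? (c :: ds) = some ((c :: ds).foldl (fun x c => x * 10 + (c.toNat - 48)) 0) := by
      simp only [pvDigitsVal?]
      exact pvDigitsGo_eq _ false 0 hdig (by simp)
    split
    · next ds' heq =>
      rw [List.cons.injEq] at heq
      obtain ⟨rfl, rfl⟩ := heq
      exact absurd hc (by decide)
    · next ds' heq =>
      rw [List.cons.injEq] at heq
      obtain ⟨rfl, rfl⟩ := heq
      exact absurd hc (by decide)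
    · rw [hgo]
      simp


theorem foldl_digits : ∀ (n : Nat), ∀ (a : Nat),
    ((Nat.digits 10 n).map Nat.digitChar).foldl (fun x c => x * 10 + (c.toNat - 48)) a
      = a * 10 ^ dlen n + rp (dlen n) n := by
  intro n
  induction n using Nat.strong_induction_on with
  | _ n ih =>
    intro a
    rcases Nat.eq_zero_or_pos n with rfl | hn
    · simp [dlen, rp]
    · rw [Nat.digits_def' (by norm_num : (1:Nat) < 10) hn]
      have hmod : n % 10 < 10 := Nat.mod_lt _ (by norm_num)
      have hlen : dlen n = dlen (n / 10) + 1 := by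
        simp [dlen, Nat.digits_def' (by norm_num : (1:Nat) < 10) hn]
      simp only [List.map_cons, List.foldl_cons, digitChar_toNat hmod]
      rw [ih (n / 10) (Nat.div_lt_self hn (by norm_num)) (a * 10 + (n % 10 + 48 - 48))]
      rw [hlen]
      show _ = a * 10 ^ (dlen (n/10) + 1) + (n % 10 * 10 ^ (dlen (n/10)) + rp (dlen (n/10)) (n / 10))
      have : n % 10 + 48 - 48 = n % 10 := by omega
      rw [this]
      ring

-- the value A adds to elem: int(str(elem)[::-1]) = rp (dlen x) x
theorem parse_rev_eq (x : Nat) :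
    pvParseChars? ((PySem.Int.toChars (x : Int)).reverse) = some ((rp (dlen x) x : Nat) : Int) := by
  rw [toChars_nonneg (by positivity)]
  rcases Nat.eq_zero_or_pos x with rfl | hx
  · decide
  · simp only [Int.toNat_natCast]
    rw [if_neg (by omega), List.reverse_reverse]
    have hne0 : Nat.digits 10 x ≠ [] := Nat.digits_ne_nil_iff_ne_zero.mpr (by omega)
    have hne : (Nat.digits 10 x).map Nat.digitChar ≠ [] := by
      simpa [List.map_eq_nil_iff] using hne0
    have hdig : ∀ c ∈ (Nat.digits 10 x).map Nat.digitChar, c.isDigit = true := by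
      intro c hc
      rw [List.mem_map] at hc
      obtain ⟨d, hd, rfl⟩ := hc
      exact digitChar_isDigit (Nat.digits_lt_base (by norm_num) hd)
    rw [pvParseChars?_digits hne hdig, foldl_digits x 0]
    simp


-- B-side bridges
theorem pvCountDigits_natCast : ∀ N : Nat, pvCountDigits (N : Int) = (dlen N : Int) := by
  intro N
  induction N using Nat.strong_induction_on with
  | _ N ih =>
    rw [pvCountDigits]
    rcases Nat.eq_zero_or_pos N with rfl | hN
    · simp [dlen]
    · rw [dif_pos (by exact_mod_cast hN)]
      rw [show PySem.Int.floordiv (N : Int) 10 = ((N / 10 : Nat) : Int) from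
            PySem.Int.floordiv_natCast N 10]
      rw [ih (N / 10) (Nat.div_lt_self hN (by norm_num))]
      have : dlen N = dlen (N / 10) + 1 := by
        simp [dlen, Nat.digits_def' (by norm_num : (1:Nat) < 10) hN]
      rw [this]
      push_cast
      ring

theorem pvRevpad_fold : ∀ (l : List Int) (r : Int) (v : Nat),
    ((l.foldl (fun (rv : Int × Int) _ =>
        (rv.1 * 10 + PySem.Int.mod rv.2 10, PySem.Int.floordiv rv.2 10)) (r, (v : Int))).1)
      = r * 10 ^ l.length + (rp l.length v : Int) := by
  intro l
  induction l with
  | nil => intro r v; simp [rp]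
  | cons x xs ih =>
    intro r v
    simp only [List.foldl_cons]
    rw [show PySem.Int.mod (v : Int) 10 = ((v % 10 : Nat) : Int) from PySem.Int.mod_natCast v 10,
        show PySem.Int.floordiv (v : Int) 10 = ((v / 10 : Nat) : Int) from PySem.Int.floordiv_natCast v 10]
    rw [ih (r * 10 + ((v % 10 : Nat) : Int)) (v / 10)]
    rw [show rp (x :: xs).length v = v % 10 * 10 ^ xs.length + rp xs.length (v / 10) from rfl,
        List.length_cons]
    push_cast
    ring

theorem pvRevpad_natCast (v m : Nat) : pvRevpad (v : Int) (m : Int) = (rp m v : Int) := by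
  unfold pvRevpad
  rw [pvRevpad_fold]
  have : (PySem.List.pyRange 0 (m : Int) 1).length = m := by
    rw [PySem.List.length_pyRange_one]
    simp
  rw [this]
  simp


-- the search space of B, stated over Nat
def MP (N : Nat) : Prop := ∃ x : Nat, 0 < x ∧ x ≤ N ∧ x + rp (dlen x) x = N

def BSearch (N : Nat) : Prop :=
  ∃ d : Nat, max 1 (dlen N - 1) ≤ d ∧ d < dlen N + 1 ∧
    ∃ H : Nat, (if 2 ≤ d then 10 ^ (d - d / 2 - 1) else 1) ≤ H ∧ H < 10 ^ (d - d / 2) ∧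
      ∃ L : Nat, L < 10 ^ (d / 2) ∧
        (H * 10 ^ (d / 2) + L) + (rp (d / 2) L * 10 ^ (d - d / 2) + rp (d - d / 2) H) = N

theorem dlen_pos {x : Nat} (hx : 0 < x) : 0 < dlen x := by
  have : Nat.digits 10 x ≠ [] := Nat.digits_ne_nil_iff_ne_zero.mpr (by omega)
  simpa [dlen] using List.length_pos_iff.mpr this

theorem central (N : Nat) (hN : 0 < N) : MP N ↔ BSearch N := by
  constructor
  · rintro ⟨x, hx0, hxN, heq⟩
    have hd1 : 0 < dlen x := dlen_pos hx0
    have hqhd : (dlen x - dlen x / 2) + dlen x / 2 = dlen x := by omega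
    have hpowq : (0:Nat) < 10 ^ (dlen x / 2) := by positivity
    obtain ⟨H, L, hxd, hL⟩ :
        ∃ H L, x = H * 10 ^ (dlen x / 2) + L ∧ L < 10 ^ (dlen x / 2) :=
      ⟨x / 10 ^ (dlen x / 2), x % 10 ^ (dlen x / 2), (Nat.div_add_mod' x _).symm,
        Nat.mod_lt _ hpowq⟩
    have hrp : rp (dlen x) x
        = rp (dlen x / 2) L * 10 ^ (dlen x - dlen x / 2) + rp (dlen x - dlen x / 2) H := by
      have h := rp_split (dlen x / 2) (dlen x - dlen x / 2) H L hL
      rw [hqhd, ← hxd] at h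
      exact h
    have hxlt : x < 10 ^ dlen x := lt_pow_dlen x
    have hpow_split : (10:Nat) ^ (dlen x - dlen x / 2) * 10 ^ (dlen x / 2) = 10 ^ dlen x := by
      rw [← pow_add, hqhd]
    have hHup : H < 10 ^ (dlen x - dlen x / 2) := by
      by_contra hc
      push Not at hc
      have : 10 ^ (dlen x - dlen x / 2) * 10 ^ (dlen x / 2) ≤ H * 10 ^ (dlen x / 2) :=
        Nat.mul_le_mul_right _ hc
      omega
    refine ⟨dlen x, ?_, ?_, H, ?_, hHup, L, hL, ?_⟩
    · have h1 : N < 10 ^ (dlen x + 1) := by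
        have := rp_lt (dlen x) x
        have hpd : (10:Nat) ^ (dlen x + 1) = 10 ^ dlen x + 9 * 10 ^ dlen x := by ring
        omega
      have := dlen_le_of_lt_pow h1
      omega
    · have := dlen_mono hxN
      omega
    · by_cases h2 : 2 ≤ dlen x
      · rw [if_pos h2]
        have hge : 10 ^ (dlen x - 1) ≤ x := pow_dlen_pred_le hx0
        by_contra hc
        push Not at hc
        have h3 : H + 1 ≤ 10 ^ (dlen x - dlen x / 2 - 1) := hc
        have h4 : (H + 1) * 10 ^ (dlen x / 2)
            ≤ 10 ^ (dlen x - dlen x / 2 - 1) * 10 ^ (dlen x / 2) :=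
          Nat.mul_le_mul_right _ h3
        have h5 : (10:Nat) ^ (dlen x - dlen x / 2 - 1) * 10 ^ (dlen x / 2) = 10 ^ (dlen x - 1) := by
          rw [← pow_add]; congr 1; omega
        have h6 : x < (H + 1) * 10 ^ (dlen x / 2) := by rw [add_mul]; omega
        omega
      · rw [if_neg h2]
        have hq0 : dlen x / 2 = 0 := by omega
        rw [hq0, pow_zero] at hxd hL
        omega
    · omega
  · rintro ⟨d, hdlo, hdhi, H, hHlo, hHhi, L, hL, heq⟩
    have hd1 : 1 ≤ d := le_trans (le_max_left _ _) hdlo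
    have hqhd : (d - d / 2) + d / 2 = d := by omega
    have hpow_split : (10:Nat) ^ (d - d / 2) * 10 ^ (d / 2) = 10 ^ d := by
      rw [← pow_add, hqhd]
    have hH0 : 0 < H := by
      rcases le_or_gt 2 d with h2 | h2
      · rw [if_pos h2] at hHlo
        calc 0 < 10 ^ (d - d / 2 - 1) := by positivity
        _ ≤ H := hHlo
      · rw [if_neg (by omega)] at hHlo
        omega
    have hx0 : 0 < H * 10 ^ (d / 2) + L := by positivity
    have hxlt : H * 10 ^ (d / 2) + L < 10 ^ d := by
      have h4 : (H + 1) * 10 ^ (d / 2) ≤ 10 ^ (d - d / 2) * 10 ^ (d / 2) :=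
        Nat.mul_le_mul_right _ hHhi
      have h6 : H * 10 ^ (d / 2) + L < (H + 1) * 10 ^ (d / 2) := by rw [add_mul]; omega
      omega
    have hxge : 10 ^ (d - 1) ≤ H * 10 ^ (d / 2) + L := by
      rcases le_or_gt 2 d with h2 | h2
      · rw [if_pos h2] at hHlo
        have h5 : (10:Nat) ^ (d - d / 2 - 1) * 10 ^ (d / 2) = 10 ^ (d - 1) := by
          rw [← pow_add]; congr 1; omega
        have h4 : 10 ^ (d - d / 2 - 1) * 10 ^ (d / 2) ≤ H * 10 ^ (d / 2) :=
          Nat.mul_le_mul_right _ hHlo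
        omega
      · have hd0 : d - 1 = 0 := by omega
        have hq0 : d / 2 = 0 := by omega
        rw [hd0, hq0]
        simp only [pow_zero]
        omega
    have hdlen : dlen (H * 10 ^ (d / 2) + L) = d := dlen_eq_iff (by omega) hxge hxlt
    have hrp : rp d (H * 10 ^ (d / 2) + L)
        = rp (d / 2) L * 10 ^ (d - d / 2) + rp (d - d / 2) H := by
      have h := rp_split (d / 2) (d - d / 2) H L hL
      rw [hqhd] at h
      exact h
    refine ⟨H * 10 ^ (d / 2) + L, hx0, by omega, ?_⟩
    rw [hdlen, hrp]
    omega


theorem strlen_pos (num : Int) (hpos : 0 < num) :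
    PySem.Str.len (PySem.Int.toStr num) = (dlen num.toNat : Int) := by
  rw [PySem.Str.len_eq, PySem.Int.toList_toStr, toChars_nonneg (by omega)]
  rw [if_neg (by omega)]
  simp [dlen]

theorem MP_start {N x : Nat} (hN : 0 < N) (hx : 0 < x)
    (heq : x + rp (dlen x) x = N) :
    (if 2 ≤ dlen N then 10 ^ (dlen N - 2) else 0) ≤ x := by
  by_cases h2 : 2 ≤ dlen N
  · rw [if_pos h2]
    by_contra hc
    push Not at hc
    have hdx : dlen x ≤ dlen N - 2 := dlen_le_of_lt_pow (by omega)
    have h3 : rp (dlen x) x < 10 ^ (dlen N - 2) :=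
      lt_of_lt_of_le (rp_lt _ _) (Nat.pow_le_pow_right (by norm_num) hdx)
    have h4 : 10 ^ (dlen N - 1) ≤ N := pow_dlen_pred_le hN
    have h5 : (10:Nat) ^ (dlen N - 1) = 10 * 10 ^ (dlen N - 2) := by
      rw [← pow_succ']; congr 1; omega
    omega
  · rw [if_neg h2]; omega

theorem A_iff_MP (N : Nat) (hN : 0 < N) :
    sumOfNumberAndReverse (N : Int) = true ↔ MP N := by
  have hpos : (0:Int) < (N : Int) := by exact_mod_cast hN
  have hnn : ((N : Int)).toNat = N := Int.toNat_natCast N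
  simp only [sumOfNumberAndReverse]
  rw [strlen_pos _ hpos, hnn]
  have hstart : (if 2 ≤ (dlen N : Int) then (10:Int) ^ ((dlen N : Int) - 2).toNat else 0)
      = ((if 2 ≤ dlen N then 10 ^ (dlen N - 2) else 0 : Nat) : Int) := by
    by_cases h2 : 2 ≤ dlen N
    · rw [if_pos (by exact_mod_cast h2), if_pos h2]
      have : ((dlen N : Int) - 2).toNat = dlen N - 2 := by omega
      rw [this]
      push_cast
      rfl
    · rw [if_neg (by exact_mod_cast h2), if_neg h2]
      rfl
  rw [hstart]
  rw [List.any_eq_true]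
  constructor
  · rintro ⟨e, hmem, hpe⟩
    rw [PySem.List.mem_pyRange_one] at hmem
    obtain ⟨hlo, hhi⟩ := hmem
    have he0 : 0 ≤ e := le_trans (by positivity) hlo
    obtain ⟨x, rfl⟩ : ∃ x : Nat, e = (x : Int) := ⟨e.toNat, (Int.toNat_of_nonneg he0).symm⟩
    rw [PySem.Str.slice?_none_none_neg_one, Option.getD_some] at hpe
    rw [show pvIntParse? (String.ofList (PySem.Int.toStr (x:Int)).toList.reverse)
          = pvParseChars? ((PySem.Int.toChars (x:Int)).reverse) by
        rw [pvIntParse?, String.toList_ofList, PySem.Int.toList_toStr]] at hpe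
    rw [parse_rev_eq x, Option.getD_some, beq_iff_eq] at hpe
    have heq : x + rp (dlen x) x = N := by exact_mod_cast hpe
    have hxN : x ≤ N := by omega
    have hx0 : 0 < x := by
      rcases Nat.eq_zero_or_pos x with rfl | h
      · rw [show dlen 0 = 0 from rfl, show rp 0 0 = 0 from rfl] at heq
        omega
      · exact h
    exact ⟨x, hx0, hxN, heq⟩
  · rintro ⟨x, hx0, hxN, heq⟩
    refine ⟨(x : Int), ?_, ?_⟩
    · rw [PySem.List.mem_pyRange_one]
      constructor
      · exact_mod_cast MP_start hN hx0 heq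
      · exact_mod_cast Nat.lt_succ_of_le hxN
    · rw [PySem.Str.slice?_none_none_neg_one, Option.getD_some]
      rw [show pvIntParse? (String.ofList (PySem.Int.toStr (x:Int)).toList.reverse)
            = pvParseChars? ((PySem.Int.toChars (x:Int)).reverse) by
          rw [pvIntParse?, String.toList_ofList, PySem.Int.toList_toStr]]
      rw [parse_rev_eq x, Option.getD_some, beq_iff_eq]
      exact_mod_cast heq


theorem check_core (N q hd H : Nat) (R : Int) (hqhd : q ≤ hd)
    (hR : R = (N:Int) - (H:Int) * (10:Int) ^ q - ((rp hd H : Nat) : Int)) :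
    (PySem.Int.mod R ((10:Int) ^ hd) < (10:Int) ^ q ∧
      pvRevpad (PySem.Int.mod R ((10:Int) ^ hd)) ((q : Nat) : Int)
        = PySem.Int.floordiv R ((10:Int) ^ hd))
    ↔ ∃ L : Nat, L < 10 ^ q ∧ (H * 10 ^ q + L) + (rp q L * 10 ^ hd + rp hd H) = N := by
  have hM : (0:Int) < (10:Int) ^ hd := by positivity
  have hqle : (10:Int) ^ q ≤ (10:Int) ^ hd := pow_le_pow_right₀ (by norm_num) hqhd
  rw [PySem.Int.mod_eq_emod_of_pos hM, PySem.Int.floordiv_eq_ediv_of_pos hM]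
  constructor
  · rintro ⟨h1, h2⟩
    have hL0 : 0 ≤ R % (10:Int) ^ hd := Int.emod_nonneg _ (ne_of_gt hM)
    obtain ⟨LN, hLN⟩ : ∃ LN : Nat, R % (10:Int) ^ hd = (LN : Int) :=
      ⟨(R % (10:Int) ^ hd).toNat, (Int.toNat_of_nonneg hL0).symm⟩
    rw [hLN] at h1 h2
    rw [pvRevpad_natCast] at h2
    have hsplit := Int.mul_ediv_add_emod R ((10:Int) ^ hd)
    rw [hLN, ← h2] at hsplit
    -- hsplit : 10^hd * rp q LN + LN = R
    refine ⟨LN, ?_, ?_⟩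
    · exact_mod_cast h1
    · have hip : ((H * 10 ^ q + LN) + (rp q LN * 10 ^ hd + rp hd H) : Int) = (N : Int) := by
        linarith [hR, hsplit]
      exact_mod_cast hip
  · rintro ⟨LN, hLlt, heq⟩
    have hRform : R = (LN : Int) + (10:Int) ^ hd * (rp q LN : Nat) := by
      have : ((H * 10 ^ q + LN) + (rp q LN * 10 ^ hd + rp hd H) : Int) = (N : Int) := by
        exact_mod_cast congrArg (fun t : Nat => (t : Int)) heq
      push_cast at this
      linarith [hR, this]
    have hLNlt : (LN : Int) < (10:Int) ^ hd := by
      calc (LN : Int) < (10:Int) ^ q := by exact_mod_cast hLlt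
      _ ≤ (10:Int) ^ hd := hqle
    have hmod : R % (10:Int) ^ hd = (LN : Int) := by
      rw [hRform, Int.add_mul_emod_self_left]
      exact Int.emod_eq_of_lt (by positivity) hLNlt
    have hdiv : R / (10:Int) ^ hd = (rp q LN : Nat) := by
      rw [hRform, Int.add_mul_ediv_left _ _ (ne_of_gt hM)]
      rw [Int.ediv_eq_zero_of_lt (by positivity) hLNlt]
      ring
    refine ⟨?_, ?_⟩
    · rw [hmod]; exact_mod_cast hLlt
    · rw [hmod, hdiv, pvRevpad_natCast]


theorem B_iff_BSearch (N : Nat) (hN : 0 < N) :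
    sumOfNumberAndReverse_alt (N : Int) = true ↔ BSearch N := by
  have hk1 : 1 ≤ dlen N := dlen_pos hN
  simp only [sumOfNumberAndReverse_alt]
  rw [if_neg (by exact_mod_cast (by omega : ¬ ((N:Int) < 0)))]
  rw [if_neg (by rw [beq_iff_eq]; exact_mod_cast (by omega : ¬ ((N:Int) = 0)))]
  rw [pvCountDigits_natCast N]
  have hmax : max (1:Int) ((dlen N : Int) - 1) = ((max 1 (dlen N - 1) : Nat) : Int) := by
    rw [Nat.cast_max]
    congr 1
    omega
  rw [hmax, List.any_eq_true]
  have hdle : dlen N / 2 ≤ dlen N := Nat.div_le_self _ _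
  constructor
  · rintro ⟨dI, hmem, hbody⟩
    rw [PySem.List.mem_pyRange_one] at hmem
    obtain ⟨hlo, hhi⟩ := hmem
    have hd0 : 0 ≤ dI := le_trans (Int.natCast_nonneg _) hlo
    obtain ⟨d, rfl⟩ : ∃ d : Nat, dI = (d : Int) := ⟨dI.toNat, (Int.toNat_of_nonneg hd0).symm⟩
    have hd1 : 1 ≤ d := by
      have : max 1 (dlen N - 1) ≤ d := by exact_mod_cast hlo
      omega
    have hq : PySem.Int.floordiv (d : Int) 2 = ((d / 2 : Nat) : Int) :=
      PySem.Int.floordiv_natCast d 2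
    rw [hq] at hbody
    have hds : (d : Int) - ((d / 2 : Nat) : Int) = (((d - d / 2) : Nat) : Int) := by
      have := Nat.div_le_self d 2; omega
    rw [hds] at hbody
    simp only [Int.toNat_natCast] at hbody
    have hm1 : ((((d - d / 2) : Nat) : Int) - 1).toNat = d - d / 2 - 1 := by omega
    rw [hm1] at hbody
    rw [List.any_eq_true] at hbody
    obtain ⟨HI, hHmem, hcheck⟩ := hbody
    rw [PySem.List.mem_pyRange_one] at hHmem
    obtain ⟨hHlo, hHhi⟩ := hHmem
    have hlowpos : (0:Int) < (if 2 ≤ (d:Int) then (10:Int) ^ (d - d / 2 - 1) else 1) := by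
      split <;> positivity
    have hH0 : 0 ≤ HI := le_trans (le_of_lt hlowpos) hHlo
    obtain ⟨H, rfl⟩ : ∃ H : Nat, HI = (H : Int) := ⟨HI.toNat, (Int.toNat_of_nonneg hH0).symm⟩
    rw [pvRevpad_natCast] at hcheck
    rw [Bool.and_eq_true, decide_eq_true_eq, beq_iff_eq] at hcheck
    have hcc := (check_core N (d / 2) (d - d / 2) H _ (by omega) rfl).mp hcheck
    refine ⟨d, by exact_mod_cast hlo, by exact_mod_cast hhi, H, ?_, by exact_mod_cast hHhi, hcc⟩
    by_cases h2 : 2 ≤ d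
    · rw [if_pos h2]
      rw [if_pos (by exact_mod_cast h2)] at hHlo
      exact_mod_cast hHlo
    · rw [if_neg h2]
      rw [if_neg (by exact_mod_cast h2)] at hHlo
      exact_mod_cast hHlo
  · rintro ⟨d, hdlo, hdhi, H, hHlo, hHhi, L, hL, heq⟩
    have hd1 : 1 ≤ d := le_trans (le_max_left _ _) hdlo
    refine ⟨(d : Int), ?_, ?_⟩
    · rw [PySem.List.mem_pyRange_one]
      exact ⟨by exact_mod_cast hdlo, by exact_mod_cast hdhi⟩
    · have hq : PySem.Int.floordiv (d : Int) 2 = ((d / 2 : Nat) : Int) :=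
        PySem.Int.floordiv_natCast d 2
      rw [hq]
      have hds : (d : Int) - ((d / 2 : Nat) : Int) = (((d - d / 2) : Nat) : Int) := by
        have := Nat.div_le_self d 2; omega
      rw [hds]
      simp only [Int.toNat_natCast]
      have hm1 : ((((d - d / 2) : Nat) : Int) - 1).toNat = d - d / 2 - 1 := by omega
      rw [hm1]
      rw [List.any_eq_true]
      refine ⟨(H : Int), ?_, ?_⟩
      · rw [PySem.List.mem_pyRange_one]
        constructor
        · by_cases h2 : 2 ≤ d
          · rw [if_pos (by exact_mod_cast h2)]
            rw [if_pos h2] at hHlo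
            exact_mod_cast hHlo
          · rw [if_neg (by exact_mod_cast h2)]
            rw [if_neg h2] at hHlo
            exact_mod_cast hHlo
        · exact_mod_cast hHhi
      · rw [pvRevpad_natCast]
        rw [Bool.and_eq_true, decide_eq_true_eq, beq_iff_eq]
        exact (check_core N (d / 2) (d - d / 2) H _ (by omega) rfl).mpr ⟨L, hL, heq⟩


theorem AB_eq (num : Int) : sumOfNumberAndReverse num = sumOfNumberAndReverse_alt num := by
  rcases lt_trichotomy num 0 with hneg | rfl | hpos
  · have hchars : PySem.Int.toChars num = '-' :: Nat.toDigits 10 num.natAbs := by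
      simp [PySem.Int.toChars, hneg]
    have hlen1 : 1 ≤ (Nat.toDigits 10 num.natAbs).length := by
      rw [toDigits_eq]
      split
      · simp
      · next h =>
        have hne : Nat.digits 10 num.natAbs ≠ [] := Nat.digits_ne_nil_iff_ne_zero.mpr h
        simpa using List.length_pos_iff.mpr hne
    have hn2 : 2 ≤ PySem.Str.len (PySem.Int.toStr num) := by
      rw [PySem.Str.len_eq, PySem.Int.toList_toStr, hchars]
      simp only [List.length_cons]
      exact_mod_cast (by omega : 2 ≤ ((Nat.toDigits 10 num.natAbs).length + 1 : Int))
    simp only [sumOfNumberAndReverse, sumOfNumberAndReverse_alt]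
    rw [if_pos hn2, if_pos hneg]
    rw [PySem.List.pyRange_one_eq_nil (by
      have hp : (0:Int) < 10 ^ ((PySem.Str.len (PySem.Int.toStr num) - 2).toNat) := by positivity
      omega)]
    rfl
  · decide
  · obtain ⟨N, rfl⟩ : ∃ N : Nat, num = (N : Int) := ⟨num.toNat, (Int.toNat_of_nonneg (le_of_lt hpos)).symm⟩
    have hN : 0 < N := by exact_mod_cast hpos
    exact Bool.eq_iff_iff.mpr
      (((A_iff_MP N hN).trans (central N hN)).trans (B_iff_BSearch N hN).symm)

-- ===== VERDICT (by name: the statement is the Claim_ definition above) =====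
theorem sumOfNumberAndReverse_spec : Claim_equal_sumOfNumberAndReverse := by
  intro num _
  unfold Spec_sumOfNumberAndReverse
  exact AB_eq num
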